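-- pv_equiv track=rewrite | github.com/sagarshinde511/answer | eval.py | extract_questions_answers
-- ===== SOURCE A (Python) =====
-- def extract_questions_answers(pdf_text):
--     lines = pdf_text.split("\n")
--     questions, answers = [], []
--     current_question, current_answer = None, ""
--
--     for line in lines:
--         line = line.strip()
--         if line.startswith("Q "):
--             if current_question:
--                 questions.append(current_question)
--                 answers.append(current_answer.strip())
--             current_question = line
--             current_answer = ""
--         elif current_question:
--             current_answer += " " + line
--
--     if current_question:
--         questions.append(current_question)
--         answers.append(current_answer.strip())
--     return questions, answers
-- ===== SOURCE B (Python) =====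
-- def extract_questions_answers(pdf_text):
--     stripped = [ln.strip() for ln in pdf_text.split("\n")]
--     marks = [(i, ln) for i, ln in enumerate(stripped) if ln.startswith("Q ")]
--     ends = [i for i, _ in marks[1:]] + [len(stripped)]
--     questions = [ln for _, ln in marks]
--     answers = [" ".join(stripped[i + 1:j]).strip() for (i, _), j in zip(marks, ends)]
--     return questions, answers
-- ===== Notes on version B (the rewrite author's own statement) =====
-- stated objective: alternative
-- what changed: Replaced the stateful accumulator loop (pending question + growing answer string) with an index-based decomposition: strip all lines, collect the (index, line) marks of Q-lines once, and build each answer by joining the slice of stripped lines between consecutive marks.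
import Mathlib
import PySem

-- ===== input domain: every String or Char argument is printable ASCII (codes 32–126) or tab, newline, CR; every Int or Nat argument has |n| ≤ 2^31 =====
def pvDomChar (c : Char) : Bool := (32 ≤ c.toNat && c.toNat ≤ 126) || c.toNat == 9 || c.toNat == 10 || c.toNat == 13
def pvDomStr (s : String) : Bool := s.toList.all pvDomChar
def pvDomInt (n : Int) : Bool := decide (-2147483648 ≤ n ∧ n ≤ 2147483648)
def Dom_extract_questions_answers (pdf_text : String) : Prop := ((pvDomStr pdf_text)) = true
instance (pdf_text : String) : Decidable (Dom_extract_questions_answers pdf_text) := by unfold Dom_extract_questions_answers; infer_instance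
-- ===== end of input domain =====

-- B replaces A's stateful accumulator loop by an index/slice decomposition (marks of Q-lines, answers as joined slices between consecutive marks); alternative algorithm of the same cost.


-- ===== PORT A =====
-- loop body of A, applied to the already-stripped line (A strips at the top of the body);
-- state = ((questions, answers), current_question, current_answer); Python truthiness of
-- current_question (None and "" falsy) is st.2.1.getD "" ≠ "".
def pvStepA (st : (List String × List String) × Option String × String) (line : String) :
    (List String × List String) × Option String × String :=
  if PySem.Str.startswith line "Q " then
    if st.2.1.getD "" ≠ "" then
      ((st.1.1 ++ [st.2.1.getD ""], st.1.2 ++ [PySem.Str.strip st.2.2]), some line, "")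
    else
      (st.1, some line, "")
  else if st.2.1.getD "" ≠ "" then
    (st.1, st.2.1, st.2.2 ++ " " ++ line)
  else
    st

-- pdf_text.split("\n"): sep is the non-empty literal "\n", so split? is always `some`; getD [] is exact.
def extract_questions_answers (pdf_text : String) : List String × List String :=
  let lines := (PySem.Str.split? pdf_text "\n").getD []
  let st := lines.foldl (fun st line => pvStepA st (PySem.Str.strip line)) (([], []), none, "")
  if st.2.1.getD "" ≠ "" then
    (st.1.1 ++ [st.2.1.getD ""], st.1.2 ++ [PySem.Str.strip st.2.2])
  else
    st.1

-- ===== PORT B =====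
def extract_questions_answers_alt (pdf_text : String) : List String × List String :=
  let stripped := ((PySem.Str.split? pdf_text "\n").getD []).map PySem.Str.strip
  let marks := (PySem.List.enumerate stripped).filter (fun p => PySem.Str.startswith p.2 "Q ")
  let ends := (marks.drop 1).map Prod.fst ++ [(stripped.length : Int)]
  let questions := marks.map Prod.snd
  let answers := (marks.zip ends).map (fun p =>
    PySem.Str.strip (PySem.Str.join " " (PySem.List.slice stripped (some (p.1.1 + 1)) (some p.2))))
  (questions, answers)

-- ===== PRECONDITION & SPEC =====
def Spec_extract_questions_answers (pdf_text : String) (out : List String × List String) : Prop := out = extract_questions_answers_alt pdf_text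
instance (pdf_text : String) (out : List String × List String) : Decidable (Spec_extract_questions_answers pdf_text out) := by unfold Spec_extract_questions_answers; infer_instance

-- ===== CLAIM (what is proved, stated in full; the proofs are below) =====
def Claim_equal_extract_questions_answers : Prop := ∀ (pdf_text : String), Dom_extract_questions_answers pdf_text → Spec_extract_questions_answers pdf_text (extract_questions_answers pdf_text)

-- ===== LEMMAS AND PROOFS =====

-- "this (stripped) line is a question line"
def pvQ (x : String) : Bool := PySem.Str.startswith x "Q "

-- canonical recursive description of the result on the list of stripped lines
def pvCollect : List String → String → List String
  | [], ca => [PySem.Str.strip ca]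
  | x :: r, ca => if pvQ x then PySem.Str.strip ca :: pvCollect r "" else pvCollect r (ca ++ " " ++ x)

def pvGo : List String → List String × List String
  | [] => ([], [])
  | x :: r => if pvQ x then (x :: r.filter (fun y => pvQ y), pvCollect r "") else pvGo r

-- A's trailing flush
def pvFinal (st : (List String × List String) × Option String × String) : List String × List String :=
  if st.2.1.getD "" ≠ "" then
    (st.1.1 ++ [st.2.1.getD ""], st.1.2 ++ [PySem.Str.strip st.2.2])
  else
    st.1

-- B's marks / answers, generalized to a start position s into the full list g
def pvMarks (g : List String) (s : Nat) : List (Int × String) :=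
  (PySem.List.enumerate (g.drop s) (s : Int)).filter (fun p => PySem.Str.startswith p.2 "Q ")

def pvAnsList (g : List String) (s : Nat) : List String :=
  ((pvMarks g s).zip (((pvMarks g s).drop 1).map Prod.fst ++ [(g.length : Int)])).map (fun p =>
    PySem.Str.strip (PySem.Str.join " " (PySem.List.slice g (some (p.1.1 + 1)) (some p.2))))

-- index of the first question line at position ≥ s (or g.length)
def pvNextQ (g : List String) (s : Nat) : Nat :=
  if h : s < g.length then (if pvQ g[s] then s else pvNextQ g (s + 1)) else g.length
termination_by g.length - s

theorem pvQ_ne_empty {x : String} (h : pvQ x = true) : x ≠ "" := by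
  intro he
  rw [he] at h
  exact absurd h (by decide)

theorem pvGo_fst (l : List String) : (pvGo l).1 = l.filter (fun y => pvQ y) := by
  induction l with
  | nil => simp [pvGo]
  | cons x r ih => by_cases h : pvQ x = true <;> simp [pvGo, h, ih]

-- A's loop from a truthy pending-question state
theorem pvFoldA_some (l : List String) (qs as : List String) (q ca : String) (hq : q ≠ "") :
    pvFinal (l.foldl pvStepA ((qs, as), some q, ca)) =
      (qs ++ q :: l.filter (fun y => pvQ y), as ++ pvCollect l ca) := by
  induction l generalizing qs as q ca with
  | nil => simp [pvFinal, pvCollect, hq]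
  | cons x r ih =>
    by_cases hx : pvQ x = true
    · have hxC : PySem.Chars.startswith x.toList ['Q', ' '] = true := by
        have h2 := hx; simp only [pvQ, PySem.Str.startswith_eq] at h2
        rw [show ("Q ".toList) = ['Q', ' '] from by decide] at h2; exact h2
      have hxe := pvQ_ne_empty hx
      rw [List.foldl_cons]
      have hstep : pvStepA ((qs, as), some q, ca) x =
          ((qs ++ [q], as ++ [PySem.Str.strip ca]), some x, "") := by
        simp [pvStepA, hxC, hq]
      rw [hstep, ih _ _ _ _ hxe]
      simp [hx, pvCollect]
    · have hxC : PySem.Chars.startswith x.toList ['Q', ' '] = false := by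
        have h2 := hx; simp only [pvQ, PySem.Str.startswith_eq, Bool.not_eq_true] at h2
        rw [show ("Q ".toList) = ['Q', ' '] from by decide] at h2; exact h2
      rw [List.foldl_cons]
      have hstep : pvStepA ((qs, as), some q, ca) x = ((qs, as), some q, ca ++ " " ++ x) := by
        simp [pvStepA, hxC, hq]
      rw [hstep, ih _ _ _ _ hq]
      simp [hx, pvCollect]

-- A's loop from the initial (None, "") state
theorem pvFoldA_none (l : List String) (qs as : List String) (ca : String) :
    pvFinal (l.foldl pvStepA ((qs, as), none, ca)) = (qs ++ (pvGo l).1, as ++ (pvGo l).2) := by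
  induction l generalizing ca with
  | nil => simp [pvFinal, pvGo]
  | cons x r ih =>
    by_cases hx : pvQ x = true
    · have hxC : PySem.Chars.startswith x.toList ['Q', ' '] = true := by
        have h2 := hx; simp only [pvQ, PySem.Str.startswith_eq] at h2
        rw [show ("Q ".toList) = ['Q', ' '] from by decide] at h2; exact h2
      rw [List.foldl_cons]
      have hstep : pvStepA ((qs, as), none, ca) x = ((qs, as), some x, "") := by
        simp [pvStepA, hxC]
      rw [hstep, pvFoldA_some r qs as x "" (pvQ_ne_empty hx)]
      simp [pvGo, hx]
    · have hxC : PySem.Chars.startswith x.toList ['Q', ' '] = false := by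
        have h2 := hx; simp only [pvQ, PySem.Str.startswith_eq, Bool.not_eq_true] at h2
        rw [show ("Q ".toList) = ['Q', ' '] from by decide] at h2; exact h2
      rw [List.foldl_cons]
      have hstep : pvStepA ((qs, as), none, ca) x = ((qs, as), none, ca) := by
        simp [pvStepA, hxC]
      rw [hstep, ih]
      simp [pvGo, hx]

theorem pvNextQ_ge (g : List String) (s : Nat) : min s g.length ≤ pvNextQ g s := by
  fun_induction pvNextQ g s with
  | case1 s h hq => omega
  | case2 s h hq ih => omega
  | case3 s h => omega

theorem pvNextQ_le (g : List String) (s : Nat) : pvNextQ g s ≤ g.length := by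
  fun_induction pvNextQ g s with
  | case1 s h hq => omega
  | case2 s h hq ih => omega
  | case3 s h => omega

theorem pvTake_nextQ (g : List String) (s : Nat) :
    (g.drop s).take (pvNextQ g s - s) = (g.drop s).takeWhile (fun x => !pvQ x) := by
  fun_induction pvNextQ g s with
  | case1 s h hq =>
    rw [List.drop_eq_getElem_cons h]
    simp [hq]
  | case2 s h hq ih =>
    rw [List.drop_eq_getElem_cons h]
    have hge := pvNextQ_ge g (s + 1)
    have hle := pvNextQ_le g (s + 1)
    rw [show pvNextQ g (s + 1) - s = (pvNextQ g (s + 1) - (s + 1)) + 1 by omega]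
    simp only [List.take_succ_cons, List.takeWhile_cons, hq]
    simp [ih]
  | case3 s h =>
    rw [List.drop_eq_nil_of_le (by omega)]
    simp

theorem pvMarks_cons (g : List String) (s : Nat) (h : s < g.length) :
    pvMarks g s = (if pvQ g[s] then [((s : Int), g[s])] else []) ++ pvMarks g (s + 1) := by
  unfold pvMarks
  rw [List.drop_eq_getElem_cons h, PySem.List.enumerate_cons, List.filter_cons]
  have : ((s : Int) + 1) = ((s + 1 : Nat) : Int) := by push_cast; ring
  rw [this]
  by_cases hq : pvQ g[s] = true
  · have hqC : PySem.Chars.startswith g[s].toList ['Q', ' '] = true := by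
      have h2 := hq; simp only [pvQ, PySem.Str.startswith_eq] at h2
      rw [show ("Q ".toList) = ['Q', ' '] from by decide] at h2; exact h2
    simp [hq, hqC]
  · have hqC : PySem.Chars.startswith g[s].toList ['Q', ' '] = false := by
      have h2 := hq; simp only [pvQ, PySem.Str.startswith_eq, Bool.not_eq_true] at h2
      rw [show ("Q ".toList) = ['Q', ' '] from by decide] at h2; exact h2
    simp [hq, hqC]

theorem pvMarks_nil (g : List String) (s : Nat) (h : ¬ s < g.length) : pvMarks g s = [] := by
  unfold pvMarks
  rw [List.drop_eq_nil_of_le (by omega)]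
  rfl

theorem pvHeadD_marks (g : List String) (s : Nat) :
    ((pvMarks g s).map Prod.fst).headD (g.length : Int) = (pvNextQ g s : Int) := by
  fun_induction pvNextQ g s with
  | case1 s h hq => rw [pvMarks_cons g s h, if_pos hq]; simp
  | case2 s h hq ih => rw [pvMarks_cons g s h, if_neg hq, List.nil_append]; exact ih
  | case3 s h => rw [pvMarks_nil g s h]; simp

theorem pvMarks_snd (g : List String) (s : Nat) :
    (pvMarks g s).map Prod.snd = (g.drop s).filter (fun y => pvQ y) := by
  by_cases h : s < g.length
  · rw [pvMarks_cons g s h, List.drop_eq_getElem_cons h, List.filter_cons]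
    by_cases hq : pvQ g[s] = true
    · rw [if_pos hq]; simp [hq, pvMarks_snd g (s + 1)]
    · rw [if_neg hq]; simp [hq, pvMarks_snd g (s + 1)]
  · rw [pvMarks_nil g s h, List.drop_eq_nil_of_le (by omega)]; rfl
termination_by g.length - s
decreasing_by all_goals omega

theorem pvFoldl_toList (k : List String) (ca : String) :
    (k.foldl (fun a x => a ++ " " ++ x) ca).toList
      = ca.toList ++ (k.map (fun x => ' ' :: x.toList)).flatten := by
  have hsp : (" " : String).toList = [' '] := by decide
  induction k generalizing ca with
  | nil => simp
  | cons x t ih => simp [ih, String.toList_append, hsp]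

theorem pvPref_join (ks : List (List Char)) (h : ks ≠ []) :
    (ks.map (fun x => ' ' :: x)).flatten = ' ' :: PySem.Chars.join [' '] ks := by
  induction ks with
  | nil => simp at h
  | cons x t ih =>
    cases t with
    | nil => simp [PySem.Chars.join_singleton]
    | cons y u =>
      rw [PySem.Chars.join_cons_cons]
      have h2 := ih (by simp)
      simp only [List.map_cons, List.flatten_cons] at h2 ⊢
      rw [h2]
      simp

theorem pvStrip_space (cs : List Char) : PySem.Chars.strip (' ' :: cs) = PySem.Chars.strip cs := by
  have hsp : PySem.Chars.isspace ' ' = true := by decide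
  simp [PySem.Chars.strip, PySem.Chars.lstrip, hsp]

-- the accumulated answer string of A equals the joined block, after strip
theorem pvStrip_acc_join (k : List String) :
    PySem.Str.strip (k.foldl (fun a x => a ++ " " ++ x) "") = PySem.Str.strip (PySem.Str.join " " k) := by
  have hsp : (" " : String).toList = [' '] := by decide
  have hemp : ("" : String).toList = [] := by decide
  apply String.toList_inj.mp
  rw [PySem.Str.toList_strip, PySem.Str.toList_strip, PySem.Str.toList_join, pvFoldl_toList, hsp, hemp]
  cases k with
  | nil => simp
  | cons x t =>
    rw [List.nil_append,
      show (List.map (fun (x : String) => ' ' :: x.toList) (x :: t))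
          = List.map (fun l => ' ' :: l) (List.map String.toList (x :: t)) from by
        rw [List.map_map]; rfl,
      pvPref_join ((x :: t).map String.toList) (by simp), pvStrip_space]

theorem pvCollect_eq (r : List String) (ca : String) :
    pvCollect r ca =
      PySem.Str.strip ((r.takeWhile (fun x => !pvQ x)).foldl (fun a x => a ++ " " ++ x) ca) :: (pvGo r).2 := by
  induction r generalizing ca with
  | nil => simp [pvCollect, pvGo]
  | cons x r ih =>
    by_cases hx : pvQ x = true
    · simp [pvCollect, pvGo, hx]
    · simp [pvCollect, pvGo, hx, ih]

theorem pvZip_shape (m0 : Int × String) (M : List (Int × String)) (L : Int) :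
    (m0 :: M).zip ((M.map Prod.fst) ++ [L])
      = (m0, (M.map Prod.fst).headD L) :: M.zip ((M.drop 1).map Prod.fst ++ [L]) := by
  cases M with
  | nil => simp
  | cons a t => simp [List.zip_cons_cons]

theorem pvAnsList_eq (g : List String) (s : Nat) : pvAnsList g s = (pvGo (g.drop s)).2 := by
  by_cases h : s < g.length
  · have hdrop := List.drop_eq_getElem_cons h
    by_cases hq : pvQ g[s] = true
    · have hm := pvMarks_cons g s h
      rw [if_pos hq, List.singleton_append] at hm
      unfold pvAnsList
      rw [hm, List.drop_one, List.tail_cons, pvZip_shape, List.map_cons, pvHeadD_marks g (s + 1)]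
      have htail : ((pvMarks g (s + 1)).zip (((pvMarks g (s + 1)).drop 1).map Prod.fst
          ++ [(g.length : Int)])).map (fun p =>
            PySem.Str.strip (PySem.Str.join " " (PySem.List.slice g (some (p.1.1 + 1)) (some p.2))))
          = pvAnsList g (s + 1) := rfl
      rw [htail, pvAnsList_eq g (s + 1)]
      have hcast : ((s : Int) + 1) = ((s + 1 : Nat) : Int) := by push_cast; ring
      rw [hdrop]
      simp only [pvGo, hq, if_pos]
      rw [pvCollect_eq (g.drop (s + 1)) "", pvStrip_acc_join]
      rw [hcast, PySem.List.slice_natCast, pvTake_nextQ g (s + 1)]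
    · have hm := pvMarks_cons g s h
      rw [if_neg hq, List.nil_append] at hm
      unfold pvAnsList
      rw [hm]
      have hstep : ((pvMarks g (s + 1)).zip (((pvMarks g (s + 1)).drop 1).map Prod.fst
          ++ [(g.length : Int)])).map (fun p =>
            PySem.Str.strip (PySem.Str.join " " (PySem.List.slice g (some (p.1.1 + 1)) (some p.2))))
          = pvAnsList g (s + 1) := rfl
      rw [hstep, pvAnsList_eq g (s + 1), hdrop]
      simp [pvGo, hq]
  · unfold pvAnsList
    rw [pvMarks_nil g s h, List.drop_eq_nil_of_le (as := g) (i := s) (by omega)]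
    simp [pvGo]
termination_by g.length - s
decreasing_by all_goals omega

-- ===== VERDICT (by name: the statement is the Claim_ definition above) =====
theorem extract_questions_answers_spec : Claim_equal_extract_questions_answers := by
  intro pdf_text _
  unfold Spec_extract_questions_answers extract_questions_answers extract_questions_answers_alt
  simp only [← List.foldl_map]
  generalize ((PySem.Str.split? pdf_text "\n").getD []).map PySem.Str.strip = g
  have h1 := pvFoldA_none g [] [] ""
  simp only [pvFinal] at h1
  rw [h1]
  simp only [List.nil_append]
  have hmarks : (PySem.List.enumerate g).filter (fun p => PySem.Str.startswith p.2 "Q ")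
      = pvMarks g 0 := by
    unfold pvMarks
    rw [List.drop_zero, Nat.cast_zero]
  rw [hmarks]
  have hq : (pvMarks g 0).map Prod.snd = (pvGo g).1 := by
    rw [pvMarks_snd g 0, List.drop_zero, pvGo_fst]
  have ha : ((pvMarks g 0).zip (((pvMarks g 0).drop 1).map Prod.fst ++ [(g.length : Int)])).map
      (fun p => PySem.Str.strip (PySem.Str.join " " (PySem.List.slice g (some (p.1.1 + 1)) (some p.2))))
      = (pvGo g).2 := by
    have h2 : pvAnsList g 0 = (pvGo (g.drop 0)).2 := pvAnsList_eq g 0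
    rw [List.drop_zero] at h2
    exact h2
  rw [hq, ha]
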